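-- pv_equiv track=rewrite | github.com/alphagov/govuk-chat-evaluation-prototype | govuk_chat_evaluation/output_guardrails/evaluate.py | _process_guardrail_numbers
-- ===== SOURCE A (Python) =====
-- from collections import Counter
-- from typing import Any, List
--
-- def _process_guardrail_numbers(
--     exact_string_context: str, numbers_str: str, num_guardrails: int
-- ) -> tuple[List[int], List[str]]:
--     """Parses, validates, filters, and deduplicates guardrail numbers."""
--     warnings = []
--     original_guardrail_numbers = []
--
--     number_segments = numbers_str.split(",")
--     for segment in number_segments:
--         stripped_segment = segment.strip()
--         try:
--             original_guardrail_numbers.append(int(stripped_segment))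
--         except ValueError as e:
--             raise ValueError(
--                 f"Guardrail string '{exact_string_context}' contains non-integer value "
--                 f"'{stripped_segment}' in the comma-separated list: {e}"
--             ) from e
--
--     if not original_guardrail_numbers:
--         return [], []
--
--     original_set = set(original_guardrail_numbers)
--     valid_range_set = {num for num in original_set if 1 <= num <= num_guardrails}
--     out_of_range_set = original_set - valid_range_set
--
--     valid_range_list = [
--         num for num in original_guardrail_numbers if 1 <= num <= num_guardrails
--     ]
--     if len(valid_range_list) != len(valid_range_set):
--         counts = Counter(valid_range_list)
--         duplicates = sorted([num for num, count in counts.items() if count > 1])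
--         warnings.append(f"Removed duplicate numbers: {duplicates}.")
--
--     if out_of_range_set:
--         warnings.append(
--             f"Removed numbers outside the valid range [1, {num_guardrails}]: {sorted(list(out_of_range_set))}."
--         )
--
--     unique_valid_numbers = sorted(list(valid_range_set))
--
--     if not unique_valid_numbers and original_guardrail_numbers:
--         warnings.append(
--             "Resulted in no valid guardrails after filtering/deduplication."
--         )
--
--     return unique_valid_numbers, warnings
-- ===== SOURCE B (Python) =====
-- def _process_guardrail_numbers(exact_string_context, numbers_str, num_guardrails):
--     """Single-pass re-implementation: one loop over the parsed integers maintains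
--     a seen set, a duplicates set and an out-of-range set; warnings are built after."""
--     numbers = []
--     for segment in numbers_str.split(","):
--         stripped = segment.strip()
--         try:
--             numbers.append(int(stripped))
--         except ValueError as e:
--             raise ValueError(
--                 f"Guardrail string '{exact_string_context}' contains non-integer value "
--                 f"'{stripped}' in the comma-separated list: {e}"
--             ) from e
--
--     seen, duplicates, out_of_range = set(), set(), set()
--     for n in numbers:
--         if 1 <= n <= num_guardrails:
--             if n in seen:
--                 duplicates.add(n)
--             else:
--                 seen.add(n)
--         else:
--             out_of_range.add(n)
--
--     warnings = []
--     if duplicates: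
--         warnings.append(f"Removed duplicate numbers: {sorted(duplicates)}.")
--     if out_of_range:
--         warnings.append(
--             f"Removed numbers outside the valid range [1, {num_guardrails}]: {sorted(out_of_range)}."
--         )
--     valid = sorted(seen)
--     if not valid:
--         warnings.append(
--             "Resulted in no valid guardrails after filtering/deduplication."
--         )
--     return valid, warnings
-- ===== Notes on version B (the rewrite author's own statement) =====
-- stated objective: simpler
-- what changed: Replaces A's five separate passes over the parsed numbers (set(), in-range set comprehension, set difference, in-range list comprehension plus Counter for duplicates) with a single loop maintaining seen/duplicates/out-of-range sets, building the warnings afterwards.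
import Mathlib
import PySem

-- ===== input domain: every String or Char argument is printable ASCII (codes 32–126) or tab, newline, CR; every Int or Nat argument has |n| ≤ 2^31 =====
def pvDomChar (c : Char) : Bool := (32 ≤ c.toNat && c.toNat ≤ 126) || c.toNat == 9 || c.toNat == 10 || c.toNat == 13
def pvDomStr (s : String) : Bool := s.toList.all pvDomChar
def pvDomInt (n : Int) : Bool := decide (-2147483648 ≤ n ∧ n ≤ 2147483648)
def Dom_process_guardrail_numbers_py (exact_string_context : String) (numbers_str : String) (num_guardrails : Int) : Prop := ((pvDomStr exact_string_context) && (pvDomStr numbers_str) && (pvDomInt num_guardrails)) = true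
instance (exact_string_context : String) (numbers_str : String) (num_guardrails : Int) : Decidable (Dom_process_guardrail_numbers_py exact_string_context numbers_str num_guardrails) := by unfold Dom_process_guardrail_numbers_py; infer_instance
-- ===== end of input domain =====

-- B replaces A's five separate passes (set comprehension, set difference, list
-- comprehension, Counter, length comparison) by ONE loop over the parsed integers
-- maintaining a seen / duplicates / out-of-range triple of sets (objective: simpler).

-- ===== PORT A =====
-- shared helpers (both Pythons parse the comma-separated string identically):
-- numbers_str.split(","): the separator is the literal "," ≠ "", so split? is always some
def pvSegs (numbers_str : String) : List String := (PySem.Str.split? numbers_str ",").getD []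

-- the parsing loop: int(segment.strip()) for each segment; none = ValueError raised
def pvParse : List String → Option (List Int)
  | [] => some []
  | seg :: rest =>
    match PySem.Int.ofStr? (PySem.Str.strip seg) with
    | none => none
    | some n => (pvParse rest).map (n :: ·)

-- Python f"{xs}" on a list of ints, e.g. "[1, 2]" (exact for lists of ints)
def pvReprIntList (l : List Int) : String := "[" ++ PySem.Str.join ", " (l.map PySem.Int.toStr) ++ "]"

def process_guardrail_numbers_py (exact_string_context : String) (numbers_str : String) (num_guardrails : Int) : List Int × List String :=
  match pvParse (pvSegs numbers_str) with
  | none => ([], [])  -- ValueError raised; excluded by Pre_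
  | some nums =>
    if nums = [] then ([], [])
    else
      let originalSet : PySem.Set Int := PySem.Set.ofList nums
      let validSet : PySem.Set Int :=
        PySem.Set.ofList (originalSet.filter (fun n => decide (1 ≤ n ∧ n ≤ num_guardrails)))
      let outOfRangeSet : PySem.Set Int := originalSet.diff validSet
      let validList : List Int := nums.filter (fun n => decide (1 ≤ n ∧ n ≤ num_guardrails))
      let w1 : List String :=
        if (validList.length : Int) ≠ PySem.Set.len validSet then
          let counts := PySem.Dict.counter validList
          let dups := PySem.List.sorted ((counts.items.filter (fun p => decide (1 < p.2))).map Prod.fst) (fun x => x)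
          ["Removed duplicate numbers: " ++ pvReprIntList dups ++ "."]
        else []
      let w2 : List String :=
        if outOfRangeSet ≠ [] then
          ["Removed numbers outside the valid range [1, " ++ PySem.Int.toStr num_guardrails ++ "]: " ++
            pvReprIntList (PySem.List.sorted outOfRangeSet (fun x => x)) ++ "."]
        else []
      let uniqueValid : List Int := PySem.List.sorted validSet (fun x => x)
      let w3 : List String :=
        if uniqueValid = [] ∧ nums ≠ [] then
          ["Resulted in no valid guardrails after filtering/deduplication."]
        else []
      (uniqueValid, w1 ++ w2 ++ w3)

-- ===== PORT B =====
def process_guardrail_numbers_py_alt (exact_string_context : String) (numbers_str : String) (num_guardrails : Int) : List Int × List String :=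
  match pvParse (pvSegs numbers_str) with
  | none => ([], [])  -- ValueError raised; excluded by Pre_
  | some nums =>
    let st : PySem.Set Int × PySem.Set Int × PySem.Set Int :=
      nums.foldl (fun st n =>
        if 1 ≤ n ∧ n ≤ num_guardrails then
          if PySem.Set.contains st.1 n then (st.1, (st.2.1).add n, st.2.2)
          else (st.1.add n, st.2.1, st.2.2)
        else (st.1, st.2.1, (st.2.2).add n))
        (PySem.Set.empty, PySem.Set.empty, PySem.Set.empty)
    let w1 : List String :=
      if st.2.1 ≠ [] then
        ["Removed duplicate numbers: " ++ pvReprIntList (PySem.List.sorted st.2.1 (fun x => x)) ++ "."]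
      else []
    let w2 : List String :=
      if st.2.2 ≠ [] then
        ["Removed numbers outside the valid range [1, " ++ PySem.Int.toStr num_guardrails ++ "]: " ++
          pvReprIntList (PySem.List.sorted st.2.2 (fun x => x)) ++ "."]
      else []
    let valid : List Int := PySem.List.sorted st.1 (fun x => x)
    let w3 : List String :=
      if valid = [] then ["Resulted in no valid guardrails after filtering/deduplication."] else []
    (valid, w1 ++ w2 ++ w3)

-- ===== PRECONDITION & SPEC =====
-- Pre_ excludes exactly the inputs where Python raises ValueError: some comma-separated
-- segment is not an integer literal after stripping (this includes numbers_str = "").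
def Pre_process_guardrail_numbers_py (exact_string_context : String) (numbers_str : String) (num_guardrails : Int) : Prop :=
  ∀ seg ∈ pvSegs numbers_str, (PySem.Int.ofStr? (PySem.Str.strip seg)).isSome = true
instance (exact_string_context : String) (numbers_str : String) (num_guardrails : Int) : Decidable (Pre_process_guardrail_numbers_py exact_string_context numbers_str num_guardrails) := by unfold Pre_process_guardrail_numbers_py; infer_instance

def pvWitness_process_guardrail_numbers_py : String × String × Int := ("guardrails: 1, 2", "1, 2, 2, 9", 3)

def Spec_process_guardrail_numbers_py (exact_string_context : String) (numbers_str : String) (num_guardrails : Int) (out : List Int × List String) : Prop := out = process_guardrail_numbers_py_alt exact_string_context numbers_str num_guardrails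
instance (exact_string_context : String) (numbers_str : String) (num_guardrails : Int) (out : List Int × List String) : Decidable (Spec_process_guardrail_numbers_py exact_string_context numbers_str num_guardrails out) := by unfold Spec_process_guardrail_numbers_py; infer_instance

-- ===== CLAIM (what is proved, stated in full; the proofs are below) =====
def Claim_equal_process_guardrail_numbers_py : Prop := ∀ (exact_string_context : String) (numbers_str : String) (num_guardrails : Int), Dom_process_guardrail_numbers_py exact_string_context numbers_str num_guardrails → Pre_process_guardrail_numbers_py exact_string_context numbers_str num_guardrails → Spec_process_guardrail_numbers_py exact_string_context numbers_str num_guardrails (process_guardrail_numbers_py exact_string_context numbers_str num_guardrails)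

-- ===== LEMMAS AND PROOFS =====

theorem pv_go_ne_nil (sep : List Char) : ∀ (fuel : Nat) (l cur : List Char) (acc : List (List Char)),
    PySem.Chars.splitOn.go sep fuel l cur acc ≠ [] := by
  intro fuel
  induction fuel with
  | zero => intro l cur acc; simp [PySem.Chars.splitOn.go]
  | succ n ih =>
    intro l cur acc
    cases l with
    | nil => simp [PySem.Chars.splitOn.go]
    | cons c rest =>
      rw [PySem.Chars.splitOn.go]
      split
      · exact ih _ _ _
      · exact ih _ _ _

theorem pv_segs_ne_nil (s : String) : pvSegs s ≠ [] := by
  simp [pvSegs, PySem.Str.split?, PySem.Chars.split?, PySem.Chars.splitOn]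
  intro h
  exact pv_go_ne_nil _ _ _ _ _ h

theorem pvParse_isSome (segs : List String)
    (h : ∀ seg ∈ segs, (PySem.Int.ofStr? (PySem.Str.strip seg)).isSome = true) :
    ∃ nums, pvParse segs = some nums ∧ nums.length = segs.length := by
  induction segs with
  | nil => exact ⟨[], rfl, rfl⟩
  | cons seg rest ih =>
    obtain ⟨n, hn⟩ := Option.isSome_iff_exists.mp (h seg (by simp))
    obtain ⟨ns, hns, hlen⟩ := ih (fun s hs => h s (by simp [hs]))
    exact ⟨n :: ns, by simp [pvParse, hn, hns], by simp [hlen]⟩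

-- the single-pass loop of B, with the accumulator generalised
def pvStep (k : Int) (st : PySem.Set Int × PySem.Set Int × PySem.Set Int) (n : Int) :
    PySem.Set Int × PySem.Set Int × PySem.Set Int :=
  if 1 ≤ n ∧ n ≤ k then
    if PySem.Set.contains st.1 n then (st.1, (st.2.1).add n, st.2.2)
    else (st.1.add n, st.2.1, st.2.2)
  else (st.1, st.2.1, (st.2.2).add n)

theorem pvLoop_spec (k : Int) : ∀ (l : List Int) (seen dups oor : PySem.Set Int),
    seen.Nodup → dups.Nodup → oor.Nodup →
    (let r := l.foldl (pvStep k) (seen, dups, oor)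
     (r.1.Nodup ∧ ∀ x, x ∈ r.1 ↔ x ∈ seen ∨ (x ∈ l ∧ 1 ≤ x ∧ x ≤ k))
     ∧ (r.2.1.Nodup ∧ ∀ x, x ∈ r.2.1 ↔ x ∈ dups ∨ ((1 ≤ x ∧ x ≤ k) ∧ x ∈ l ∧
          (x ∈ seen ∨ 2 ≤ (l.filter (fun n => decide (1 ≤ n ∧ n ≤ k))).count x)))
     ∧ (r.2.2.Nodup ∧ ∀ x, x ∈ r.2.2 ↔ x ∈ oor ∨ (x ∈ l ∧ ¬(1 ≤ x ∧ x ≤ k)))) := by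
  intro l
  induction l with
  | nil => intro seen dups oor h1 h2 h3; exact ⟨⟨h1, by simp⟩, ⟨h2, by simp⟩, ⟨h3, by simp⟩⟩
  | cons n t ih =>
    intro seen dups oor h1 h2 h3
    by_cases hP : 1 ≤ n ∧ n ≤ k
    · by_cases hmem : n ∈ seen
      · have hct : PySem.Set.contains seen n = true := (PySem.Set.contains_iff seen n).mpr hmem
        have hstep : pvStep k (seen, dups, oor) n = (seen, dups.add n, oor) := by
          unfold pvStep; rw [if_pos hP]; rw [show PySem.Set.contains (seen, dups, oor).1 n = true from hct]; simp
        simp only [List.foldl_cons, hstep]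
        obtain ⟨⟨ha1, ha2⟩, ⟨hb1, hb2⟩, ⟨hc1, hc2⟩⟩ :=
          ih seen (dups.add n) oor h1 (PySem.Set.nodup_add dups n h2) h3
        refine ⟨⟨ha1, ?_⟩, ⟨hb1, ?_⟩, ⟨hc1, ?_⟩⟩ <;> intro x
        · rw [ha2 x]
          constructor
          · rintro (h | ⟨h, hk⟩)
            · exact Or.inl h
            · exact Or.inr ⟨by simp [h], hk⟩
          · rintro (h | ⟨h, hk⟩)
            · exact Or.inl h
            · rcases List.mem_cons.mp h with rfl | h
              · exact Or.inl hmem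
              · exact Or.inr ⟨h, hk⟩
        · rw [hb2 x, PySem.Set.mem_add]
          by_cases hxn : x = n
          · subst hxn
            simp [hP, hmem]
          · have : ((n :: t).filter (fun m => decide (1 ≤ m ∧ m ≤ k))).count x
                 = (t.filter (fun m => decide (1 ≤ m ∧ m ≤ k))).count x := by
              simp [hP, (show ¬ n = x from fun h => hxn h.symm)]
            rw [this]
            simp [List.mem_cons, hxn]
        · rw [hc2 x]
          by_cases hxn : x = n
          · subst hxn; simp [hP]
          · simp [List.mem_cons, hxn]
      · have hct : PySem.Set.contains seen n = false := by
          rw [← Bool.not_eq_true]; simp [hmem]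
        have hstep : pvStep k (seen, dups, oor) n = (seen.add n, dups, oor) := by
          unfold pvStep; rw [if_pos hP]; rw [show PySem.Set.contains (seen, dups, oor).1 n = false from hct]; simp
        simp only [List.foldl_cons, hstep]
        obtain ⟨⟨ha1, ha2⟩, ⟨hb1, hb2⟩, ⟨hc1, hc2⟩⟩ :=
          ih (seen.add n) dups oor (PySem.Set.nodup_add seen n h1) h2 h3
        refine ⟨⟨ha1, ?_⟩, ⟨hb1, ?_⟩, ⟨hc1, ?_⟩⟩ <;> intro x
        · rw [ha2 x, PySem.Set.mem_add]
          by_cases hxn : x = n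
          · subst hxn; simp [hP]
          · simp [List.mem_cons, hxn]
        · rw [hb2 x]
          by_cases hxn : x = n
          · subst hxn
            have hcnt : ((x :: t).filter (fun m => decide (1 ≤ m ∧ m ≤ k))).count x
                 = (t.filter (fun m => decide (1 ≤ m ∧ m ≤ k))).count x + 1 := by
              simp [hP]
            have hmemfil : x ∈ t.filter (fun m => decide (1 ≤ m ∧ m ≤ k)) ↔ x ∈ t := by
              simp [List.mem_filter, hP]
            rw [PySem.Set.mem_add]
            constructor
            · rintro (h | ⟨_, hmt, _⟩)
              · exact Or.inl h
              · refine Or.inr ⟨hP, by simp, Or.inr ?_⟩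
                rw [hcnt]
                have : 0 < (t.filter (fun m => decide (1 ≤ m ∧ m ≤ k))).count x :=
                  List.count_pos_iff.mpr (hmemfil.mpr hmt)
                omega
            · rintro (h | ⟨_, _, (h | h)⟩)
              · exact Or.inl h
              · exact absurd h hmem
              · refine Or.inr ⟨hP, ?_, Or.inl (Or.inr rfl)⟩
                rw [hcnt] at h
                have : 0 < (t.filter (fun m => decide (1 ≤ m ∧ m ≤ k))).count x := by omega
                exact hmemfil.mp (List.count_pos_iff.mp this)
          · have : ((n :: t).filter (fun m => decide (1 ≤ m ∧ m ≤ k))).count x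
                 = (t.filter (fun m => decide (1 ≤ m ∧ m ≤ k))).count x := by
              simp [hP, (show ¬ n = x from fun h => hxn h.symm)]
            rw [this, PySem.Set.mem_add]
            simp [List.mem_cons, hxn]
        · rw [hc2 x]
          by_cases hxn : x = n
          · subst hxn; simp [hP]
          · simp [List.mem_cons, hxn]
    · have hstep : pvStep k (seen, dups, oor) n = (seen, dups, oor.add n) := by
        unfold pvStep; rw [if_neg hP]
      simp only [List.foldl_cons, hstep]
      obtain ⟨⟨ha1, ha2⟩, ⟨hb1, hb2⟩, ⟨hc1, hc2⟩⟩ :=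
        ih seen dups (oor.add n) h1 h2 (PySem.Set.nodup_add oor n h3)
      refine ⟨⟨ha1, ?_⟩, ⟨hb1, ?_⟩, ⟨hc1, ?_⟩⟩ <;> intro x
      · rw [ha2 x]
        by_cases hxn : x = n
        · subst hxn; simp [hP]
        · simp [List.mem_cons, hxn]
      · rw [hb2 x]
        by_cases hxn : x = n
        · subst hxn; simp [hP]
        · have : ((n :: t).filter (fun m => decide (1 ≤ m ∧ m ≤ k))).count x
               = (t.filter (fun m => decide (1 ≤ m ∧ m ≤ k))).count x := by
            simp [hP]
          rw [this]
          simp [List.mem_cons, hxn]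
      · rw [hc2 x, PySem.Set.mem_add]
        by_cases hxn : x = n
        · subst hxn; simp [hP]
        · simp [List.mem_cons, hxn]

theorem pv_sorted_eq_of_nodup_mem (xs ys : List Int) (hx : xs.Nodup) (hy : ys.Nodup)
    (h : ∀ a, a ∈ xs ↔ a ∈ ys) :
    PySem.List.sorted xs (fun x => x) = PySem.List.sorted ys (fun x => x) :=
  (PySem.List.sorted_id_eq_sorted_id_iff_perm xs ys).mpr ((List.perm_ext_iff_of_nodup hx hy).mpr h)

-- ===== VERDICT (by name: the statement is the Claim_ definition above) =====
theorem process_guardrail_numbers_py_spec : Claim_equal_process_guardrail_numbers_py := by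
  intro c s k _ hpre
  unfold Spec_process_guardrail_numbers_py
  obtain ⟨nums, hn, hlen⟩ := pvParse_isSome _ hpre
  have hsegs := pv_segs_ne_nil s
  have hne : nums ≠ [] := by
    intro h
    subst h
    exact hsegs (List.length_eq_zero_iff.mp hlen.symm)
  rw [process_guardrail_numbers_py, process_guardrail_numbers_py_alt, hn]
  simp only [if_neg hne]
  have hfold : nums.foldl
      (fun (st : PySem.Set Int × PySem.Set Int × PySem.Set Int) n =>
        if 1 ≤ n ∧ n ≤ k then
          if PySem.Set.contains st.1 n then (st.1, (st.2.1).add n, st.2.2)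
          else (st.1.add n, st.2.1, st.2.2)
        else (st.1, st.2.1, (st.2.2).add n))
      (PySem.Set.empty, PySem.Set.empty, PySem.Set.empty)
      = nums.foldl (pvStep k) (PySem.Set.empty, PySem.Set.empty, PySem.Set.empty) := rfl
  rw [hfold]
  obtain ⟨⟨ha1, ha2⟩, ⟨hb1, hb2⟩, ⟨hc1, hc2⟩⟩ :=
    pvLoop_spec k nums PySem.Set.empty PySem.Set.empty PySem.Set.empty
      List.nodup_nil List.nodup_nil List.nodup_nil
  set r := nums.foldl (pvStep k) (PySem.Set.empty, PySem.Set.empty, PySem.Set.empty) with hr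
  simp only [List.not_mem_nil, false_or, PySem.Set.empty] at ha2 hb2 hc2
  -- abbreviations for the A side
  set Pb : Int → Bool := fun n => decide (1 ≤ n ∧ n ≤ k) with hPb
  set L : List Int := nums.filter Pb with hL
  set validSet : PySem.Set Int := PySem.Set.ofList ((PySem.Set.ofList nums).filter Pb) with hV
  have hVmem : ∀ x, x ∈ validSet ↔ x ∈ nums ∧ (1 ≤ x ∧ x ≤ k) := by
    intro x
    rw [hV, PySem.Set.mem_ofList, List.mem_filter, PySem.Set.mem_ofList, hPb]
    simp
  have hLmem : ∀ x, x ∈ L ↔ x ∈ nums ∧ (1 ≤ x ∧ x ≤ k) := by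
    intro x
    rw [hL, List.mem_filter, hPb]
    simp
  -- the returned valid list is the same
  have hvalid : PySem.List.sorted validSet (fun x => x) = PySem.List.sorted r.1 (fun x => x) := by
    refine pv_sorted_eq_of_nodup_mem _ _ (PySem.Set.nodup_ofList _) ha1 (fun a => ?_)
    rw [hVmem a, ha2 a]
  -- out-of-range: same set, same emptiness
  have hoorMem : ∀ x, x ∈ (PySem.Set.ofList nums).diff validSet ↔ x ∈ r.2.2 := by
    intro x
    rw [PySem.Set.mem_diff, PySem.Set.mem_ofList, hVmem x, hc2 x]
    tauto
  have hoorSorted : PySem.List.sorted ((PySem.Set.ofList nums).diff validSet) (fun x => x)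
      = PySem.List.sorted r.2.2 (fun x => x) :=
    pv_sorted_eq_of_nodup_mem _ _ (PySem.Set.nodup_diff _ _ (PySem.Set.nodup_ofList _)) hc1 hoorMem
  have hoorCond : ((PySem.Set.ofList nums).diff validSet ≠ []) ↔ (r.2.2 ≠ []) := by
    rw [ne_eq, ne_eq, List.eq_nil_iff_forall_not_mem, List.eq_nil_iff_forall_not_mem]
    constructor <;> intro h <;> intro h' <;> apply h <;> intro a
    · exact fun ha => h' a ((hoorMem a).mp ha)
    · exact fun ha => h' a ((hoorMem a).mpr ha)
  -- duplicates: same sorted list, same condition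
  have hdupA : ((PySem.Dict.counter L).items.filter (fun p => decide (1 < p.2))).map Prod.fst
      = (PySem.Set.ofList L).filter (fun x => decide (1 < (L.count x : Int))) := by
    rw [PySem.Dict.items_counter, List.filter_map, List.map_map]
    simp [Function.comp_def]
  have hdupAmem : ∀ x, x ∈ (PySem.Set.ofList L).filter (fun x => decide (1 < (L.count x : Int))) ↔ x ∈ r.2.1 := by
    intro x
    rw [List.mem_filter, PySem.Set.mem_ofList, hb2 x, hLmem x]
    constructor
    · rintro ⟨⟨hxn, hxk⟩, hcnt⟩
      refine ⟨hxk, hxn, ?_⟩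
      simp only [decide_eq_true_eq] at hcnt
      omega
    · rintro ⟨hxk, hxn, hcnt⟩
      refine ⟨⟨hxn, hxk⟩, ?_⟩
      simp only [decide_eq_true_eq]
      omega
  have hdupSorted : PySem.List.sorted
        (((PySem.Dict.counter L).items.filter (fun p => decide (1 < p.2))).map Prod.fst) (fun x => x)
      = PySem.List.sorted r.2.1 (fun x => x) := by
    rw [hdupA]
    exact pv_sorted_eq_of_nodup_mem _ _ ((PySem.Set.nodup_ofList L).filter _) hb1 hdupAmem
  have hVlen : validSet.length = L.dedup.length := by
    refine List.Perm.length_eq ((List.perm_ext_iff_of_nodup (PySem.Set.nodup_ofList _) L.nodup_dedup).mpr ?_)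
    intro a
    rw [List.mem_dedup, hVmem a, hLmem a]
  have hdupCond : ((L.length : Int) ≠ PySem.Set.len validSet) ↔ (r.2.1 ≠ []) := by
    rw [PySem.Set.len, hVlen]
    rw [ne_eq, Int.natCast_inj]
    constructor
    · intro h
      have hnodup : ¬ L.Nodup := by
        intro hnd
        exact h (by rw [List.dedup_eq_self.mpr hnd])
      rw [List.nodup_iff_count_le_one] at hnodup
      push Not at hnodup
      obtain ⟨a, ha⟩ := hnodup
      have haL : a ∈ L := List.count_pos_iff.mp (by omega)
      rw [ne_eq, List.eq_nil_iff_forall_not_mem]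
      intro hall
      obtain ⟨hxn, hxk⟩ := (hLmem a).mp haL
      exact hall a ((hb2 a).mpr ⟨hxk, hxn, by omega⟩)
    · intro h heq
      have hd : L.dedup = L := (List.dedup_sublist L).eq_of_length heq.symm
      have hnd : L.Nodup := by rw [← hd]; exact L.nodup_dedup
      rw [ne_eq, List.eq_nil_iff_forall_not_mem] at h
      push Not at h
      obtain ⟨a, ha⟩ := h
      obtain ⟨hxk, hxn, hcnt⟩ := (hb2 a).mp ha
      have := (List.nodup_iff_count_le_one.mp hnd) a
      omega
  -- assemble
  rw [hvalid, if_congr hdupCond rfl rfl, if_congr hoorCond rfl rfl, hdupSorted, hoorSorted,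
    if_congr (show (PySem.List.sorted r.1 (fun x => x) = [] ∧ nums ≠ []) ↔ PySem.List.sorted r.1 (fun x => x) = [] from ⟨fun h => h.1, fun h => ⟨h, hne⟩⟩) rfl rfl]
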